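-- pv_equiv track=rewrite | github.com/vedithraavi/DAA-LAB | daa trees.py | reverse_even_strings
-- ===== SOURCE A (Python) =====
-- def reverse_even_strings(sentence):
--     words = sentence.split()
--
--     modified_words = []
--
--     for i, word in enumerate(words):
--         if i % 2 == 1:
--             reversed_word = word[::-1]
--             modified_words.append(reversed_word)
--         else:
--             modified_words.append(word)
--
--     modified_sentence = ' '.join(modified_words)
--
--     return modified_sentence
-- ===== SOURCE B (Python) =====
-- def reverse_even_strings(sentence):
--     # Pairwise recursion over the word list: keep the first word of each pair,
--     # reverse the second; no index counter or parity test anywhere.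
--     def pairs(ws):
--         if len(ws) < 2:
--             return list(ws)
--         return [ws[0], ws[1][::-1]] + pairs(ws[2:])
--     return ' '.join(pairs(sentence.split()))
-- ===== Notes on version B (the rewrite author's own statement) =====
-- stated objective: alternative
-- what changed: Replaces the enumerate loop with a per-element parity test by a pairwise recursion over the word list (keep one word, reverse the next), so no index counter or modulus test exists.
import Mathlib
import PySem

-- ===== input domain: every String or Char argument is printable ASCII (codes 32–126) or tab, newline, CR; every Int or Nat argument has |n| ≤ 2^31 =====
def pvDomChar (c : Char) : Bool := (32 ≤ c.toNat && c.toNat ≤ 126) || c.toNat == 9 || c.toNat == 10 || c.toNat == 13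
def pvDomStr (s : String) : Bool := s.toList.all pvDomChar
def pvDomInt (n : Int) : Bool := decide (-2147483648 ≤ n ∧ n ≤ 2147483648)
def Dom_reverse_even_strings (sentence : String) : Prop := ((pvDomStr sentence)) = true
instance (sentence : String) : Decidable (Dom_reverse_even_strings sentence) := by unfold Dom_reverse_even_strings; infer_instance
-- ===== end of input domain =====

-- B replaces A's enumerate-loop-with-parity-test by a pairwise recursion over the word list (alternative decomposition, same cost).


-- ===== PORT A =====
-- word[::-1]: PySem.Str.slice? with step -1 never returns none (step ≠ 0), so getD "" is exact
def reverse_even_strings (sentence : String) : String :=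
  let words := PySem.Str.split₀ sentence
  let modified_words := (PySem.List.enumerate words).foldl
    (fun acc (p : Int × String) =>
      if PySem.Int.mod p.1 2 == 1 then
        acc ++ [(PySem.Str.slice? p.2 none none (-1)).getD ""]
      else
        acc ++ [p.2]) []
  PySem.Str.join " " modified_words

-- ===== PORT B =====
-- pairwise recursion of Source B's helper `pairs`
def pvPairs : List String → List String
  | [] => []
  | [w] => [w]
  | a :: b :: rest => a :: (PySem.Str.slice? b none none (-1)).getD "" :: pvPairs rest

def reverse_even_strings_alt (sentence : String) : String :=
  PySem.Str.join " " (pvPairs (PySem.Str.split₀ sentence))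

-- ===== PRECONDITION & SPEC =====
def Spec_reverse_even_strings (sentence : String) (out : String) : Prop := out = reverse_even_strings_alt sentence
instance (sentence : String) (out : String) : Decidable (Spec_reverse_even_strings sentence out) := by unfold Spec_reverse_even_strings; infer_instance

-- ===== CLAIM (what is proved, stated in full; the proofs are below) =====
def Claim_equal_reverse_even_strings : Prop := ∀ (sentence : String), Dom_reverse_even_strings sentence → Spec_reverse_even_strings sentence (reverse_even_strings sentence)

-- ===== LEMMAS AND PROOFS =====
theorem pvFoldl_enum_eq_pairs (ws : List String) : ∀ (acc : List String) (n : Nat),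
    (PySem.List.enumerate ws ((2 * n : Nat) : Int)).foldl
      (fun acc (p : Int × String) =>
        if PySem.Int.mod p.1 2 == 1 then
          acc ++ [(PySem.Str.slice? p.2 none none (-1)).getD ""]
        else
          acc ++ [p.2]) acc = acc ++ pvPairs ws := by
  induction ws using pvPairs.induct with
  | case1 => intro acc n; simp [PySem.List.enumerate, pvPairs]
  | case2 w =>
    intro acc n
    simp [PySem.List.enumerate_cons, PySem.List.enumerate_nil, pvPairs, List.foldl]
  | case3 a b rest ih =>
    intro acc n
    have h0 : PySem.Int.mod ((2 * n : Nat) : Int) 2 = 0 := by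
      simp
    have h1 : PySem.Int.mod (((2 * n : Nat) : Int) + 1) 2 = 1 := by
      have : (((2 * n : Nat) : Int) + 1) = ((2 * n + 1 : Nat) : Int) := by push_cast; ring
      rw [this]
      simp
    have h2 : (((2 * n : Nat) : Int) + 1 + 1) = ((2 * (n + 1) : Nat) : Int) := by push_cast; ring
    rw [PySem.List.enumerate_cons, PySem.List.enumerate_cons]
    simp only [List.foldl, h0, h1, h2, beq_self_eq_true, if_true,
      show ((0 : Int) == 1) = false from rfl, Bool.false_eq_true, if_false]
    rw [ih (acc ++ [a] ++ [(PySem.Str.slice? b none none (-1)).getD ""]) (n + 1)]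
    simp [pvPairs]

-- ===== VERDICT (by name: the statement is the Claim_ definition above) =====
theorem reverse_even_strings_spec : Claim_equal_reverse_even_strings := by
  intro sentence _
  unfold Spec_reverse_even_strings reverse_even_strings reverse_even_strings_alt
  have h := pvFoldl_enum_eq_pairs (PySem.Str.split₀ sentence) [] 0
  simp only [Nat.mul_zero, Nat.cast_zero, List.nil_append] at h
  exact congrArg (PySem.Str.join " ") h
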